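-- pv_equiv track=rewrite | github.com/HardM00N/BOJ | 프로그래머스/Lv. 1/숫자 짝꿍.py | solution
-- ===== SOURCE A (Python) =====
-- def solution(X, Y):
--     ans = ''
--
--     a = {str(i):0 for i in range(9, -1, -1)}
--     b = {str(i):0 for i in range(9, -1, -1)}
--
--     for x in X:
--         a[x] += 1
--     for y in Y:
--         b[y] += 1
--
--     for k in a:
--         if a[k] != 0 and b[k] != 0:
--             ans += k * min(a[k], b[k])
--
--     if ans:
--         if int(ans):
--             return ans
--         else:
--             return '0'
--     else:
--         return '-1'
-- ===== SOURCE B (Python) =====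
-- def solution(X, Y):
--     xs = sorted(map(int, X), reverse=True)
--     ys = sorted(map(int, Y), reverse=True)
--     res = []
--     i = j = 0
--     while i < len(xs) and j < len(ys):
--         if xs[i] == ys[j]:
--             res.append(xs[i])
--             i += 1
--             j += 1
--         elif xs[i] > ys[j]:
--             i += 1
--         else:
--             j += 1
--     ans = ''.join(map(str, res))
--     if ans:
--         if int(ans):
--             return ans
--         return '0'
--     return '-1'
-- ===== Notes on version B (the rewrite author's own statement) =====
-- stated objective: alternative
-- what changed: Replaces A's two per-digit frequency dictionaries and dict-iteration output loop by sorting both strings in descending order and collecting the common digits with a two-pointer merge, which yields the common multiset already in descending order.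
import Mathlib
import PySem

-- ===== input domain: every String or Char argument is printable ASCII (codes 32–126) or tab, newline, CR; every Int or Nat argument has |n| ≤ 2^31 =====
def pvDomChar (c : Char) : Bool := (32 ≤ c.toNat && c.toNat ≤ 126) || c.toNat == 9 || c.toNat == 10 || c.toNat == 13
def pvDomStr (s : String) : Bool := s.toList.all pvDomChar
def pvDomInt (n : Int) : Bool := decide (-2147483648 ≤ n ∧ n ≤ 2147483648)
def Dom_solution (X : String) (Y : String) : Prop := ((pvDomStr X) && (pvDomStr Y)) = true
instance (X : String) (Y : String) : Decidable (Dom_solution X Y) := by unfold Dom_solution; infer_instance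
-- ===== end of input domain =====

-- B replaces A's per-digit frequency dictionaries by a two-pointer merge of the two
-- descending-sorted character lists; same result, a genuinely different algorithm (not faster).

-- ===== PORT A =====
-- Python's single-character string dict keys ("0".."9") are modelled as Char
-- (str(i) for 0 ≤ i ≤ 9 is the character with code 48+i); exact on this domain.
def solution (X : String) (Y : String) : String :=
  let a0 : PySem.Dict Char Int :=
    (PySem.List.pyRange 9 (-1) (-1)).foldl (fun d i => d.insert (Char.ofNat (48 + i.toNat)) 0) PySem.Dict.empty
  let b0 : PySem.Dict Char Int :=
    (PySem.List.pyRange 9 (-1) (-1)).foldl (fun d i => d.insert (Char.ofNat (48 + i.toNat)) 0) PySem.Dict.empty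
  -- 'a[x] += 1' raises KeyError when x is not a digit; those inputs are outside Pre_solution
  let a := X.toList.foldl (fun d x => d.modify x 0 (· + 1)) a0
  let b := Y.toList.foldl (fun d y => d.modify y 0 (· + 1)) b0
  let ans := a.keys.foldl (fun acc k =>
      if a.getD k 0 ≠ 0 ∧ b.getD k 0 ≠ 0 then
        acc ++ PySem.List.pyRepeat [k] (min (a.getD k 0) (b.getD k 0))
      else acc) ([] : List Char)
  if ans ≠ [] then
    if (PySem.Int.ofChars? ans).getD 0 ≠ 0 then String.ofList ans else "0"
  else "-1"

-- ===== PORT B =====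
-- int(c) for a one-character string; ValueError (none) on a non-digit, outside Pre_solution
def charVal (c : Char) : Int := (PySem.Int.ofChars? [c]).getD 0

-- the two-pointer while loop of Source B: advance the pointer with the larger digit,
-- collect on equality (structural recursion on the two suffixes)
def mergeCommon {α : Type} [LinearOrder α] : List α → List α → List α
  | [], _ => []
  | _ :: _, [] => []
  | x :: xs, y :: ys =>
    if x = y then x :: mergeCommon xs ys
    else if y < x then mergeCommon xs (y :: ys)
    else mergeCommon (x :: xs) ys
termination_by xs ys => xs.length + ys.length
decreasing_by all_goals (simp only [List.length_cons]; omega)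

def solution_alt (X : String) (Y : String) : String :=
  let xs := PySem.List.sorted (X.toList.map charVal) (fun v => v) true
  let ys := PySem.List.sorted (Y.toList.map charVal) (fun v => v) true
  let ans := (mergeCommon xs ys).flatMap (fun d => PySem.Int.toChars d)   -- ''.join(map(str, res))
  if ans ≠ [] then
    if (PySem.Int.ofChars? ans).getD 0 ≠ 0 then String.ofList ans else "0"
  else "-1"

-- ===== PRECONDITION & SPEC =====
-- Pre_ excludes exactly the inputs where A raises KeyError ('a[x] += 1' with a
-- non-digit character): both strings must consist of digit characters only.
def Pre_solution (X : String) (Y : String) : Prop :=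
  X.toList.all PySem.Chars.isdigit = true ∧ Y.toList.all PySem.Chars.isdigit = true
instance (X : String) (Y : String) : Decidable (Pre_solution X Y) := by unfold Pre_solution; infer_instance
def pvWitness_solution : String × String := ("12480", "02758")

def Spec_solution (X : String) (Y : String) (out : String) : Prop := out = solution_alt X Y
instance (X : String) (Y : String) (out : String) : Decidable (Spec_solution X Y out) := by unfold Spec_solution; infer_instance

-- ===== CLAIM (what is proved, stated in full; the proofs are below) =====
def Claim_equal_solution : Prop := ∀ (X : String) (Y : String), Dom_solution X Y → Pre_solution X Y → Spec_solution X Y (solution X Y)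

-- ===== LEMMAS AND PROOFS =====

-- the ten digit characters, as A's dict keys iterate them (descending)
def digitsL : List Char := ['9', '8', '7', '6', '5', '4', '3', '2', '1', '0']

-- the canonical common string: per digit, min multiplicity, digits descending
def canon (X : String) (Y : String) : List Char :=
  digitsL.flatMap (fun k => List.replicate (min (X.toList.count k) (Y.toList.count k)) k)

lemma mem_digitsL_iff (c : Char) : c ∈ digitsL ↔ PySem.Chars.isdigit c = true := by
  unfold PySem.Chars.isdigit digitsL
  constructor
  · intro h; fin_cases h <;> decide
  · intro h
    simp only [Bool.and_eq_true, decide_eq_true_eq, Char.le_def, UInt32.le_iff_toNat_le] at h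
    obtain ⟨h1, h2⟩ := h
    have h1' : 48 ≤ c.toNat := h1
    have h2' : c.toNat ≤ 57 := h2
    have hc : Char.ofNat c.toNat = c := Char.ofNat_toNat c
    interval_cases hn : c.toNat <;> rw [← hc] <;> decide

lemma set_update_of_subset (s : PySem.Set Char) (l : List Char) (h : ∀ x ∈ l, x ∈ s) :
    PySem.Set.update s l = s := by
  induction l generalizing s with
  | nil => rfl
  | cons x t ih =>
    have hmem : x ∈ s := h x (by simp)
    have hx : PySem.Set.add s x = s := by unfold PySem.Set.add; simp [PySem.Set.contains, hmem]
    show PySem.Set.update (PySem.Set.add s x) t = s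
    rw [hx]; exact ih s (fun y hy => h y (by simp [hy]))

lemma ansA_eq_canon (X Y : String) (h : Pre_solution X Y) :
    solution X Y = (if canon X Y ≠ [] then
      if (PySem.Int.ofChars? (canon X Y)).getD 0 ≠ 0 then String.ofList (canon X Y) else "0"
    else "-1") := by
  obtain ⟨hX, hY⟩ := h
  unfold solution
  show (if ((X.toList.foldl (fun d x => d.modify x 0 (· + 1)) ((PySem.List.pyRange 9 (-1) (-1)).foldl (fun d i => d.insert (Char.ofNat (48 + i.toNat)) 0) (PySem.Dict.empty : PySem.Dict Char Int))).keys.foldl (fun acc k => if (X.toList.foldl (fun d x => d.modify x 0 (· + 1)) ((PySem.List.pyRange 9 (-1) (-1)).foldl (fun d i => d.insert (Char.ofNat (48 + i.toNat)) 0) (PySem.Dict.empty : PySem.Dict Char Int))).getD k 0 ≠ 0 ∧ (Y.toList.foldl (fun d y => d.modify y 0 (· + 1)) ((PySem.List.pyRange 9 (-1) (-1)).foldl (fun d i => d.insert (Char.ofNat (48 + i.toNat)) 0) (PySem.Dict.empty : PySem.Dict Char Int))).getD k 0 ≠ 0 then acc ++ PySem.List.pyRepeat [k] (min ((X.toList.foldl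 (fun d x => d.modify x 0 (· + 1)) ((PySem.List.pyRange 9 (-1) (-1)).foldl (fun d i => d.insert (Char.ofNat (48 + i.toNat)) 0) (PySem.Dict.empty : PySem.Dict Char Int))).getD k 0) ((Y.toList.foldl (fun d y => d.modify y 0 (· + 1)) ((PySem.List.pyRange 9 (-1) (-1)).foldl (fun d i => d.insert (Char.ofNat (48 + i.toNat)) 0) (PySem.Dict.empty : PySem.Dict Char Int))).getD k 0)) else acc) ([] : List Char)) ≠ [] then if (PySem.Int.ofChars? ((X.toList.foldl (fun d x => d.modify x 0 (· + 1)) ((PySem.List.pyRange 9 (-1) (-1)).foldl (fun d i => d.insert (Char.ofNat (48 + i.toNat)) 0) (PySem.Dict.empty : PySem.Dict Char Int))).keys.foldl (fun acc k => if (X.toList.foldl (fun d x => d.modify x 0 (· + 1)) ((PySem.List.pyRange 9 (-1) (-1)).foldl (fun d i => d.insert (Char.ofNat (48 + i.toNat)) 0) (PySem.Dict.empty : PySem.Dict Char Int))).getD k 0 ≠ 0 ∧ (Y.toList.foldl (fun d y => d.modify y 0 (· + 1)) ((PySem.List.pyRange 9 (-1) (-1)).foldl (fun d i => d.insert (Char.ofNat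 (48 + i.toNat)) 0) (PySem.Dict.empty : PySem.Dict Char Int))).getD k 0 ≠ 0 then acc ++ PySem.List.pyRepeat [k] (min ((X.toList.foldl (fun d x => d.modify x 0 (· + 1)) ((PySem.List.pyRange 9 (-1) (-1)).foldl (fun d i => d.insert (Char.ofNat (48 + i.toNat)) 0) (PySem.Dict.empty : PySem.Dict Char Int))).getD k 0) ((Y.toList.foldl (fun d y => d.modify y 0 (· + 1)) ((PySem.List.pyRange 9 (-1) (-1)).foldl (fun d i => d.insert (Char.ofNat (48 + i.toNat)) 0) (PySem.Dict.empty : PySem.Dict Char Int))).getD k 0)) else acc) ([] : List Char))).getD 0 ≠ 0 then String.ofList ((X.toList.foldl (fun d x => d.modify x 0 (· + 1)) ((PySem.List.pyRange 9 (-1) (-1)).foldl (fun d i => d.insert (Char.ofNat (48 + i.toNat)) 0) (PySem.Dict.empty : PySem.Dict Char Int))).keys.foldl (fun acc k => if (X.toList.foldl (fun d x => d.modify x 0 (· + 1)) ((PySem.List.pyRange 9 (-1) (-1)).foldl (fun d i => d.insert (Char.ofNat (48 + i.toNat)) 0) (PySem.Dict.empty : PySem.Dict Char Int))).getD k 0 ≠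 0 ∧ (Y.toList.foldl (fun d y => d.modify y 0 (· + 1)) ((PySem.List.pyRange 9 (-1) (-1)).foldl (fun d i => d.insert (Char.ofNat (48 + i.toNat)) 0) (PySem.Dict.empty : PySem.Dict Char Int))).getD k 0 ≠ 0 then acc ++ PySem.List.pyRepeat [k] (min ((X.toList.foldl (fun d x => d.modify x 0 (· + 1)) ((PySem.List.pyRange 9 (-1) (-1)).foldl (fun d i => d.insert (Char.ofNat (48 + i.toNat)) 0) (PySem.Dict.empty : PySem.Dict Char Int))).getD k 0) ((Y.toList.foldl (fun d y => d.modify y 0 (· + 1)) ((PySem.List.pyRange 9 (-1) (-1)).foldl (fun d i => d.insert (Char.ofNat (48 + i.toNat)) 0) (PySem.Dict.empty : PySem.Dict Char Int))).getD k 0)) else acc) ([] : List Char)) else "0" else "-1") = _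
  have ha0 : (PySem.List.pyRange 9 (-1) (-1)).foldl
      (fun d i => d.insert (Char.ofNat (48 + i.toNat)) 0) (PySem.Dict.empty : PySem.Dict Char Int)
      = PySem.Dict.mk [('9',0),('8',0),('7',0),('6',0),('5',0),('4',0),('3',0),('2',0),('1',0),('0',0)] := by
    decide
  rw [ha0]
  set a0 : PySem.Dict Char Int :=
    PySem.Dict.mk [('9',0),('8',0),('7',0),('6',0),('5',0),('4',0),('3',0),('2',0),('1',0),('0',0)] with ha0def
  have ha0getD : ∀ c : Char, a0.getD c 0 = 0 := by
    intro c
    rw [ha0def, PySem.Dict.getD_eq_get?_getD]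
    simp only [PySem.Dict.get?_mk_cons]
    split_ifs <;> rfl
  have ha0keys : a0.keys = digitsL := by rw [ha0def]; decide
  set A := X.toList.foldl (fun d x => d.modify x 0 (· + 1)) a0 with hAdef
  set B := Y.toList.foldl (fun d y => d.modify y 0 (· + 1)) a0 with hBdef
  have hAc : ∀ c : Char, A.getD c 0 = (X.toList.count c : Int) := by
    intro c; rw [hAdef, PySem.Dict.getD_foldl_modify_add_one, ha0getD]; simp
  have hBc : ∀ c : Char, B.getD c 0 = (Y.toList.count c : Int) := by
    intro c; rw [hBdef, PySem.Dict.getD_foldl_modify_add_one, ha0getD]; simp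
  have hAkeys : A.keys = digitsL := by
    rw [hAdef, PySem.Dict.keys_foldl_modify, ha0keys]
    exact set_update_of_subset digitsL X.toList
      (fun x hx => (mem_digitsL_iff x).mpr (by simpa using List.all_eq_true.mp hX x hx))
  have hans : A.keys.foldl (fun acc k =>
      if A.getD k 0 ≠ 0 ∧ B.getD k 0 ≠ 0 then
        acc ++ PySem.List.pyRepeat [k] (min (A.getD k 0) (B.getD k 0))
      else acc) ([] : List Char) = canon X Y := by
    rw [hAkeys]
    have hbody : ∀ (acc : List Char) (k : Char), k ∈ digitsL →
        (if A.getD k 0 ≠ 0 ∧ B.getD k 0 ≠ 0 then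
          acc ++ PySem.List.pyRepeat [k] (min (A.getD k 0) (B.getD k 0))
        else acc)
        = acc ++ List.replicate (min (X.toList.count k) (Y.toList.count k)) k := by
      intro acc k _
      rw [hAc, hBc, PySem.List.pyRepeat_singleton]
      by_cases hnz : (X.toList.count k : Int) ≠ 0 ∧ (Y.toList.count k : Int) ≠ 0
      · rw [if_pos hnz]
        congr 1
        congr 1
        omega
      · rw [if_neg hnz]
        have : min (X.toList.count k) (Y.toList.count k) = 0 := by
          push Not at hnz
          omega
        rw [this]
        simp
    refine (PySem.List.foldl_congr_mem _ _ _ _ hbody).trans ?_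
    rw [PySem.List.foldl_append_eq_flatMap]
    simp [canon]
  rw [hans]

lemma mergeCommon_sublist {α : Type} [LinearOrder α] (xs ys : List α) :
    (mergeCommon xs ys).Sublist xs := by
  fun_induction mergeCommon with
  | case1 => simp
  | case2 => simp
  | case3 xs y ys ih => exact ih.cons₂ y
  | case4 x xs y ys h h2 ih => exact ih.cons x
  | case5 x xs y ys h h2 ih => exact ih

lemma mergeCommon_count {α : Type} [LinearOrder α] (xs ys : List α) :
    xs.Pairwise (· ≥ ·) → ys.Pairwise (· ≥ ·) →
    ∀ c : α, (mergeCommon xs ys).count c = min (xs.count c) (ys.count c) := by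
  induction xs, ys using mergeCommon.induct with
  | case1 ys => intro _ _ c; simp [mergeCommon]
  | case2 x xs => intro _ _ c; simp [mergeCommon]
  | case3 xs y ys ih =>
    intro hx hy c
    simp only [mergeCommon]
    rw [if_pos trivial, List.count_cons, ih (List.Pairwise.of_cons hx) (List.Pairwise.of_cons hy) c]
    by_cases hyc : y = c <;> simp [hyc]
  | case4 x xs y ys h h2 ih =>
    intro hx hy c
    simp only [mergeCommon, if_neg h, if_pos h2]
    rw [ih (List.Pairwise.of_cons hx) hy c]
    have hzero : (y :: ys).count x = 0 := by
      rw [List.count_eq_zero]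
      intro hmem
      rcases List.mem_cons.mp hmem with rfl | hmem'
      · exact lt_irrefl _ h2
      · exact absurd h2 (not_lt.mpr ((List.pairwise_cons.mp hy).1 x hmem'))
    by_cases hcx : c = x
    · subst hcx; rw [hzero]; simp
    · rw [List.count_cons_of_ne (Ne.symm hcx)]
  | case5 x xs y ys h h2 ih =>
    intro hx hy c
    simp only [mergeCommon, if_neg h, if_neg h2]
    rw [ih hx (List.Pairwise.of_cons hy) c]
    have hyx : x < y := by
      rcases lt_trichotomy x y with hlt | heq | hgt
      · exact hlt
      · exact absurd heq h
      · exact absurd hgt h2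
    have hzero : (x :: xs).count y = 0 := by
      rw [List.count_eq_zero]
      intro hmem
      rcases List.mem_cons.mp hmem with rfl | hmem'
      · exact lt_irrefl _ hyx
      · exact absurd hyx (not_lt.mpr ((List.pairwise_cons.mp hx).1 y hmem'))
    by_cases hcy : c = y
    · subst hcy; rw [hzero]; simp
    · rw [List.count_cons_of_ne (Ne.symm hcy)]

lemma count_flatMap_replicate {α : Type} [DecidableEq α] (D : List α) (hD : D.Nodup)
    (n : α → Nat) (c : α) :
    (D.flatMap (fun k => List.replicate (n k) k)).count c = if c ∈ D then n c else 0 := by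
  induction D with
  | nil => simp
  | cons d D ih =>
    rw [List.flatMap_cons, List.count_append, ih hD.of_cons, List.count_replicate]
    rcases List.nodup_cons.mp hD with ⟨hnd, _⟩
    by_cases hcd : c = d
    · subst hcd; simp [hnd]
    · simp [hcd, Ne.symm hcd]

lemma pairwise_flatMap_replicate {α : Type} [LinearOrder α] (D : List α) (hD : D.Pairwise (· > ·))
    (n : α → Nat) :
    (D.flatMap (fun k => List.replicate (n k) k)).Pairwise (· ≥ ·) := by
  induction D with
  | nil => simp
  | cons d D ih =>
    rw [List.flatMap_cons, List.pairwise_append]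
    refine ⟨List.pairwise_replicate.mpr (by simp), ih hD.of_cons, ?_⟩
    intro x hx y hy
    have hxd : x = d := List.eq_of_mem_replicate hx
    rcases List.mem_flatMap.mp hy with ⟨k, hk, hyk⟩
    have hyk' : y = k := List.eq_of_mem_replicate hyk
    subst hxd; subst hyk'
    exact le_of_lt ((List.pairwise_cons.mp hD).1 y hk)

def digitsI : List Int := [9, 8, 7, 6, 5, 4, 3, 2, 1, 0]

def charOf (k : Int) : Char := Char.ofNat (48 + k.toNat)

lemma charVal_eq_iff (c : Char) (hc : c ∈ digitsL) (k : Int) (hk : k ∈ digitsI) :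
    charVal c = k ↔ c = charOf k := by
  fin_cases hc <;> fin_cases hk <;> simp [charVal, charOf] <;> decide

lemma charVal_mem_digitsI (c : Char) (hc : c ∈ digitsL) : charVal c ∈ digitsI := by
  fin_cases hc <;> decide

lemma count_map_charVal (l : List Char) (hl : ∀ c ∈ l, c ∈ digitsL) (k : Int) (hk : k ∈ digitsI) :
    (l.map charVal).count k = l.count (charOf k) := by
  induction l with
  | nil => simp
  | cons c t ih =>
    rw [List.map_cons, List.count_cons, List.count_cons,
      ih (fun d hd => hl d (List.mem_cons_of_mem _ hd))]
    have := charVal_eq_iff c (hl c (by simp)) k hk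
    by_cases hck : charVal c = k
    · have hc2 : c = charOf k := this.mp hck
      subst hc2; simp [hck]
    · have h2 : ¬ c = charOf k := fun hh => hck (this.mpr hh)
      simp [hck, h2]

lemma toChars_charOf (k : Int) (hk : k ∈ digitsI) : PySem.Int.toChars k = [charOf k] := by
  fin_cases hk <;> decide

lemma flatMap_replicate_single {α β : Type} (n : Nat) (a : α) (g : α → List β) (b : β)
    (h : g a = [b]) : (List.replicate n a).flatMap g = List.replicate n b := by
  induction n with
  | zero => simp
  | succ m ih => rw [List.replicate_succ, List.replicate_succ, List.flatMap_cons, ih, h]; rfl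

lemma flatMap_congr_mem {α β : Type} (l : List α) (f g : α → List β)
    (h : ∀ x ∈ l, f x = g x) : l.flatMap f = l.flatMap g := by
  induction l with
  | nil => rfl
  | cons x t ih =>
    rw [List.flatMap_cons, List.flatMap_cons, h x (by simp),
      ih (fun y hy => h y (List.mem_cons_of_mem _ hy))]

lemma ansB_eq_canon (X Y : String) (h : Pre_solution X Y) :
    (mergeCommon (PySem.List.sorted (X.toList.map charVal) (fun v => v) true)
      (PySem.List.sorted (Y.toList.map charVal) (fun v => v) true)).flatMap
        (fun d => PySem.Int.toChars d) = canon X Y := by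
  have hXd : ∀ c ∈ X.toList, c ∈ digitsL := fun c hc =>
    (mem_digitsL_iff c).mpr (by simpa using List.all_eq_true.mp h.1 c hc)
  have hYd : ∀ c ∈ Y.toList, c ∈ digitsL := fun c hc =>
    (mem_digitsL_iff c).mpr (by simpa using List.all_eq_true.mp h.2 c hc)
  have hxs : (PySem.List.sorted (X.toList.map charVal) (fun v => v) true).Pairwise (· ≥ ·) :=
    (PySem.List.sorted_pairwise_rev (X.toList.map charVal) (fun v => v)).imp (fun hab => hab)
  have hys : (PySem.List.sorted (Y.toList.map charVal) (fun v => v) true).Pairwise (· ≥ ·) :=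
    (PySem.List.sorted_pairwise_rev (Y.toList.map charVal) (fun v => v)).imp (fun hab => hab)
  -- the merged int list is the canonical descending int list
  have hmerge : mergeCommon (PySem.List.sorted (X.toList.map charVal) (fun v => v) true)
      (PySem.List.sorted (Y.toList.map charVal) (fun v => v) true)
      = digitsI.flatMap (fun k => List.replicate
          (min ((X.toList.map charVal).count k) ((Y.toList.map charVal).count k)) k) := by
    have hcnt : ∀ k : Int,
        (mergeCommon (PySem.List.sorted (X.toList.map charVal) (fun v => v) true)
          (PySem.List.sorted (Y.toList.map charVal) (fun v => v) true)).count k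
        = (digitsI.flatMap (fun k => List.replicate
            (min ((X.toList.map charVal).count k) ((Y.toList.map charVal).count k)) k)).count k := by
      intro k
      rw [mergeCommon_count _ _ hxs hys k,
        (PySem.List.sorted_perm (X.toList.map charVal) (fun v => v) true).count_eq,
        (PySem.List.sorted_perm (Y.toList.map charVal) (fun v => v) true).count_eq,
        count_flatMap_replicate digitsI (by decide)]
      by_cases hk : k ∈ digitsI
      · simp [hk]
      · have hx0 : (X.toList.map charVal).count k = 0 := by
          rw [List.count_eq_zero]; intro hm
          rcases List.mem_map.mp hm with ⟨c, hc, rfl⟩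
          exact hk (charVal_mem_digitsI c (hXd c hc))
        have hy0 : (Y.toList.map charVal).count k = 0 := by
          rw [List.count_eq_zero]; intro hm
          rcases List.mem_map.mp hm with ⟨c, hc, rfl⟩
          exact hk (charVal_mem_digitsI c (hYd c hc))
        simp [hk, hx0, hy0]
    have hms := List.Pairwise.sublist (mergeCommon_sublist
      (PySem.List.sorted (X.toList.map charVal) (fun v => v) true)
      (PySem.List.sorted (Y.toList.map charVal) (fun v => v) true)) hxs
    have hcs := pairwise_flatMap_replicate digitsI (by decide)
      (fun k => min ((X.toList.map charVal).count k) ((Y.toList.map charVal).count k))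
    exact (List.perm_iff_count.mpr hcnt).eq_of_pairwise
      (fun a b _ _ h1 h2 => le_antisymm h2 h1) hms hcs
  rw [hmerge]
  -- flatten the per-digit int blocks into the per-digit char blocks
  have hdig : digitsL = digitsI.map charOf := by decide
  unfold canon
  rw [hdig, List.flatMap_map, List.flatMap_assoc]
  refine flatMap_congr_mem _ _ _ ?_
  intro k hk
  rw [flatMap_replicate_single _ _ _ (charOf k) (toChars_charOf k hk),
    count_map_charVal X.toList hXd k hk, count_map_charVal Y.toList hYd k hk]

-- ===== VERDICT (by name: the statement is the Claim_ definition above) =====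
theorem solution_spec : Claim_equal_solution := by
  intro X Y _ hpre
  unfold Spec_solution
  rw [ansA_eq_canon X Y hpre]
  have hB : solution_alt X Y =
      (if (mergeCommon (PySem.List.sorted (X.toList.map charVal) (fun v => v) true)
            (PySem.List.sorted (Y.toList.map charVal) (fun v => v) true)).flatMap
              (fun d => PySem.Int.toChars d) ≠ [] then
        if (PySem.Int.ofChars? ((mergeCommon (PySem.List.sorted (X.toList.map charVal) (fun v => v) true)
              (PySem.List.sorted (Y.toList.map charVal) (fun v => v) true)).flatMap
                (fun d => PySem.Int.toChars d))).getD 0 ≠ 0 then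
          String.ofList ((mergeCommon (PySem.List.sorted (X.toList.map charVal) (fun v => v) true)
              (PySem.List.sorted (Y.toList.map charVal) (fun v => v) true)).flatMap
                (fun d => PySem.Int.toChars d))
        else "0"
      else "-1") := rfl
  rw [hB, ansB_eq_canon X Y hpre]
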